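-- pv_equiv track=rewrite | github.com/Zippy-Zappy/FinalParadigmas | enteros.py | es_entero
-- ===== SOURCE A (Python) =====
-- def es_entero(lexema):
--     Q0 = 0
--     Q = [0, 1, 2, 3]
--     F = [2]
--
--     estado_actual = Q0
--     indice = 0
--
--     SIGMA = {
--         "MENOS": 0,
--         "DIGITO": 1,
--         "OTRO": 2
--     }
--
--     DELTA = [
--         [1, 2, 3], #transiciones de Q0
--         [3, 2, 3], #transiciones de Q1
--         [3, 2, 3], #transiciones de Q2
--         [3, 3, 3] #transiciones del estado muerto
--     ]
--
--     def simbolo(caracter):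
--         if caracter >= '0' and caracter <= '9':
--             return SIGMA["DIGITO"]
--         if caracter == '-':
--             return SIGMA["MENOS"]
--
--         return SIGMA["OTRO"]
--
--     while indice < len(lexema) and estado_actual != 3:
--         estado_actual = DELTA[estado_actual][simbolo(lexema[indice])]
--
--         indice += 1
--
--     return estado_actual in F
-- ===== SOURCE B (Python) =====
-- def es_entero(lexema):
--     if not lexema:
--         return False
--     start = 1 if lexema[0] == '-' else 0
--     if start == len(lexema):
--         return False
--     return all('0' <= c <= '9' for c in lexema[start:])
-- ===== Notes on version B (the rewrite author's own statement) =====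
-- stated objective: idiomatic
-- what changed: Replaced the DFA transition table and state-stepping loop with a direct check: optional leading minus sign, then at least one character, all of which must be ASCII digits.
import Mathlib
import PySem

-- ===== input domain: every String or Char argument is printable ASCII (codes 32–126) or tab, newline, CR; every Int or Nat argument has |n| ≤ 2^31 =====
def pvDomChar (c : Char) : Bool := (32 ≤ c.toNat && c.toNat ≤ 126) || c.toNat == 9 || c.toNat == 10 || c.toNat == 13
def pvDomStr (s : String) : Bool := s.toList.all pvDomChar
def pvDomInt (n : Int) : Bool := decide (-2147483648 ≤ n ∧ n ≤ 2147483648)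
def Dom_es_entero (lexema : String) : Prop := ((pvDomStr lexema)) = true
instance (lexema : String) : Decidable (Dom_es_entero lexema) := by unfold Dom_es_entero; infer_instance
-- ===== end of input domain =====

-- B replaces A's DFA transition table and state loop by a direct optional-sign-then-all-digits check (idiomatic).


-- ===== PORT A =====
-- simbolo: classify a character as MENOS=0 / DIGITO=1 / OTRO=2
def pvSimbolo (c : Char) : Nat :=
  if '0' ≤ c ∧ c ≤ '9' then 1
  else if c = '-' then 0
  else 2

-- DELTA[state][symbol], the transition table of A
def pvDelta (st sym : Nat) : Nat :=
  (([[1, 2, 3], [3, 2, 3], [3, 2, 3], [3, 3, 3]] : List (List Nat)).getD st []).getD sym 3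

-- the while loop: advance through the characters while estado_actual ≠ 3
def pvLoopA (st : Nat) : List Char → Nat
  | [] => st
  | c :: rest => if st ≠ 3 then pvLoopA (pvDelta st (pvSimbolo c)) rest else st

def es_entero (lexema : String) : Bool :=
  ([2] : List Nat).contains (pvLoopA 0 lexema.toList)

-- ===== PORT B =====
def es_entero_alt (lexema : String) : Bool :=
  match lexema.toList with
  | [] => false
  | c :: _ =>
    let start := if c = '-' then 1 else 0
    if start = lexema.toList.length then false
    else (lexema.toList.drop start).all (fun ch => decide ('0' ≤ ch ∧ ch ≤ '9'))

-- ===== PRECONDITION & SPEC =====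
def Spec_es_entero (lexema : String) (out : Bool) : Prop := out = es_entero_alt lexema
instance (lexema : String) (out : Bool) : Decidable (Spec_es_entero lexema out) := by unfold Spec_es_entero; infer_instance

-- ===== CLAIM (what is proved, stated in full; the proofs are below) =====
def Claim_equal_es_entero : Prop := ∀ (lexema : String), Dom_es_entero lexema → Spec_es_entero lexema (es_entero lexema)

-- ===== LEMMAS AND PROOFS =====
theorem pvLoopA_dead (l : List Char) : pvLoopA 3 l = 3 := by
  induction l with
  | nil => rfl
  | cons c rest ih => simpa [pvLoopA] using ih

theorem pvLoopA_acc (l : List Char) :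
    (decide (pvLoopA 2 l = 2)) = l.all (fun ch => decide ('0' ≤ ch) && decide (ch ≤ '9')) := by
  induction l with
  | nil => rfl
  | cons c rest ih =>
    by_cases h1 : '0' ≤ c
    · by_cases h2 : c ≤ '9'
      · simp [pvLoopA, pvDelta, pvSimbolo, h1, h2, ih]
      · by_cases hc : c = '-' <;>
          simp [pvLoopA, pvDelta, pvSimbolo, h1, h2, hc, pvLoopA_dead]
    · by_cases hc : c = '-' <;>
        simp [pvLoopA, pvDelta, pvSimbolo, h1, hc, pvLoopA_dead]

theorem pvLoopA_sign (l : List Char) :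
    (decide (pvLoopA 1 l = 2)) =
      (!l.isEmpty && l.all (fun ch => decide ('0' ≤ ch) && decide (ch ≤ '9'))) := by
  cases l with
  | nil => rfl
  | cons c rest =>
    by_cases h1 : '0' ≤ c
    · by_cases h2 : c ≤ '9'
      · simp [pvLoopA, pvDelta, pvSimbolo, h1, h2, pvLoopA_acc]
      · by_cases hc : c = '-' <;>
          simp [pvLoopA, pvDelta, pvSimbolo, h1, h2, hc, pvLoopA_dead]
    · by_cases hc : c = '-' <;>
        simp [pvLoopA, pvDelta, pvSimbolo, h1, hc, pvLoopA_dead]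

-- ===== VERDICT (by name: the statement is the Claim_ definition above) =====
theorem es_entero_spec : Claim_equal_es_entero := by
  intro lexema _
  unfold Spec_es_entero es_entero es_entero_alt
  cases hl : lexema.toList with
  | nil => simp [pvLoopA]
  | cons c rest =>
    have hlen : lexema.toList.length = rest.length + 1 := by rw [hl]; rfl
    by_cases hm : c = '-'
    · have h1 : ¬ '0' ≤ c := by subst hm; decide
      by_cases hr : rest = [] <;>
        simp [pvLoopA, pvDelta, pvSimbolo, hm, h1, hlen, pvLoopA_sign, hr,
          List.length_eq_zero_iff]
    · by_cases h1 : '0' ≤ c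
      · by_cases h2 : c ≤ '9'
        · simp [pvLoopA, pvDelta, pvSimbolo, hm, h1, h2, hl, hlen, pvLoopA_acc]
        · simp [pvLoopA, pvDelta, pvSimbolo, hm, h1, h2, hl, hlen, pvLoopA_dead]
      · simp [pvLoopA, pvDelta, pvSimbolo, hm, h1, hl, hlen, pvLoopA_dead]
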